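-- pv_equiv track=rewrite | github.com/seiforesti/final_step | data_wave/backend/scripts_automation/app_cpy/api/classifiers/data_sensitivity_classifier.py | classify_to_sensitivity
-- ===== SOURCE A (Python) =====
-- from typing import List, Optional
--
-- CLASSIFICATION_TO_SENSITIVITY = {
--     "pii": "Confidential",
--     "personal data": "Confidential",
--     "financial": "Confidential",
--     "secret": "Secret",
--     "high confidential": "High Confidential",
--     "confidential": "Confidential",
--     "internal usage": "Internal Usage",
--     "public": "Public",
--     "sensitive": "Confidential",
--     "restricted": "Secret",
--     "regulated": "Confidential",
--     # Add more mappings as needed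
-- }
--
-- SENSITIVITY_PRIORITY = [
--     "Secret",
--     "High Confidential",
--     "Confidential",
--     "Internal Usage",
--     "Public"
-- ]
--
-- def normalize_classification_name(name: str) -> str:
--     """
--     Normalize classification name by stripping suffixes like [Regex], trimming, and lowercasing.
--     """
--     name = name.lower().strip()
--     if "[" in name:
--         name = name.split("[")[0].strip()
--     return name
--
-- def classify_to_sensitivity(classifications: List[str]) -> Optional[str]:
--     """
--     Given a list of classification names, return the most restrictive data sensitivity label.
--     """
--     normalized = [normalize_classification_name(c) for c in classifications]
--     matched_labels = set()
--
--     for c in normalized: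
--         label = CLASSIFICATION_TO_SENSITIVITY.get(c)
--         if label:
--             matched_labels.add(label)
--
--     if not matched_labels:
--         return "Not Classified"
--
--     # Return the highest priority label among matched labels
--     for priority_label in SENSITIVITY_PRIORITY:
--         if priority_label in matched_labels:
--             return priority_label
--
--     return "Not Classified"
-- ===== SOURCE B (Python) =====
-- # B: single pass keeping a running (rank, label) minimum instead of
-- # building a set of labels and re-scanning the priority list afterwards.
-- CLASSIFICATION_TO_RANKED = {
--     "pii": (2, "Confidential"),
--     "personal data": (2, "Confidential"),
--     "financial": (2, "Confidential"),
--     "secret": (0, "Secret"),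
--     "high confidential": (1, "High Confidential"),
--     "confidential": (2, "Confidential"),
--     "internal usage": (3, "Internal Usage"),
--     "public": (4, "Public"),
--     "sensitive": (2, "Confidential"),
--     "restricted": (0, "Secret"),
--     "regulated": (2, "Confidential"),
-- }
--
-- def _step(best, name):
--     """Fold one classification name into the running (rank, label) minimum."""
--     c = name.lower().strip()
--     if "[" in c:
--         c = c.split("[")[0].strip()
--     entry = CLASSIFICATION_TO_RANKED.get(c)
--     if entry is not None and (best is None or entry[0] < best[0]):
--         return entry
--     return best
--
-- def classify_to_sensitivity(classifications):
--     best = None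
--     for name in classifications:
--         best = _step(best, name)
--     return best[1] if best is not None else "Not Classified"
-- ===== Notes on version B (the rewrite author's own statement) =====
-- stated objective: alternative
-- what changed: Replaces A's two-phase build-a-set-of-labels-then-rescan-the-priority-list structure with a single pass keeping a running (rank,label) minimum accumulator, using a dict that maps each classification directly to its priority rank.
import Mathlib
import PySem

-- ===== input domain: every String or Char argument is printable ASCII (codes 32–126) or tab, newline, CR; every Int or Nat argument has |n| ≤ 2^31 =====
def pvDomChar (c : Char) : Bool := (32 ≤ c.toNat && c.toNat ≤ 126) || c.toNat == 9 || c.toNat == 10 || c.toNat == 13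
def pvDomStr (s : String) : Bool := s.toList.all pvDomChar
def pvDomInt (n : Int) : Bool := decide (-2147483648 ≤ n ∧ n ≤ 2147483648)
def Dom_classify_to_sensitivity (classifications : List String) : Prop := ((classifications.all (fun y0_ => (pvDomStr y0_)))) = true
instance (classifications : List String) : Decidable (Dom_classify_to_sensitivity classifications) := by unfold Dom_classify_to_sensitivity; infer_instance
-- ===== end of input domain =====

-- B replaces A's build-a-set-of-labels-then-rescan-the-priority-list structure with a
-- single pass keeping a running (rank, label) minimum (objective: alternative, same cost).

-- ===== PORT A =====
def CLASSIFICATION_TO_SENSITIVITY : PySem.Dict String String := PySem.Dict.ofList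
  [("pii", "Confidential"), ("personal data", "Confidential"), ("financial", "Confidential"),
   ("secret", "Secret"), ("high confidential", "High Confidential"), ("confidential", "Confidential"),
   ("internal usage", "Internal Usage"), ("public", "Public"), ("sensitive", "Confidential"),
   ("restricted", "Secret"), ("regulated", "Confidential")]

def SENSITIVITY_PRIORITY : List String :=
  ["Secret", "High Confidential", "Confidential", "Internal Usage", "Public"]

-- normalize_classification_name (appears verbatim in both Pythons).
-- name.split("[")[0]: split on the nonempty separator "[" never raises and never returns
-- an empty list, so Python's [0] is exact here (`(… .getD []).headD ""` is never the default).
def normalize_classification_name (name : String) : String :=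
  let n := PySem.Str.strip (PySem.Str.lower name)
  if PySem.Str.isIn "[" n then PySem.Str.strip (((PySem.Str.split? n "[").getD []).headD "") else n

-- the `for priority_label in SENSITIVITY_PRIORITY: if … return` loop
def scanPriority : List String → PySem.Set String → String
  | [], _ => "Not Classified"
  | p :: rest, m => if PySem.Set.contains m p then p else scanPriority rest m

def classify_to_sensitivity (classifications : List String) : String :=
  let normalized := classifications.map normalize_classification_name
  let matched := normalized.foldl
    (fun s c =>
      match PySem.Dict.get? CLASSIFICATION_TO_SENSITIVITY c with
      | some label => if label ≠ "" then PySem.Set.add s label else s   -- `if label:` truthiness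
      | none => s)
    PySem.Set.empty
  if matched.isEmpty then "Not Classified"
  else scanPriority SENSITIVITY_PRIORITY matched

-- ===== PORT B =====
def CLASSIFICATION_TO_RANKED : PySem.Dict String (Int × String) := PySem.Dict.ofList
  [("pii", (2, "Confidential")), ("personal data", (2, "Confidential")), ("financial", (2, "Confidential")),
   ("secret", (0, "Secret")), ("high confidential", (1, "High Confidential")), ("confidential", (2, "Confidential")),
   ("internal usage", (3, "Internal Usage")), ("public", (4, "Public")), ("sensitive", (2, "Confidential")),
   ("restricted", (0, "Secret")), ("regulated", (2, "Confidential"))]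

-- port of Source B's _step helper
def pyStep (best : Option (Int × String)) (name : String) : Option (Int × String) :=
  let c0 := PySem.Str.strip (PySem.Str.lower name)
  let c := if PySem.Str.isIn "[" c0 then PySem.Str.strip (((PySem.Str.split? c0 "[").getD []).headD "") else c0
  match PySem.Dict.get? CLASSIFICATION_TO_RANKED c with
  | some entry =>
    match best with
    | none => some entry
    | some b => if entry.1 < b.1 then some entry else some b
  | none => best

def classify_to_sensitivity_alt (classifications : List String) : String :=
  let best := classifications.foldl pyStep (none : Option (Int × String))
  match best with
  | some b => b.2
  | none => "Not Classified"

-- ===== PRECONDITION & SPEC =====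
def Spec_classify_to_sensitivity (classifications : List String) (out : String) : Prop := out = classify_to_sensitivity_alt classifications
instance (classifications : List String) (out : String) : Decidable (Spec_classify_to_sensitivity classifications out) := by unfold Spec_classify_to_sensitivity; infer_instance

-- ===== CLAIM (what is proved, stated in full; the proofs are below) =====
def Claim_equal_classify_to_sensitivity : Prop := ∀ (classifications : List String), Dom_classify_to_sensitivity classifications → Spec_classify_to_sensitivity classifications (classify_to_sensitivity classifications)

-- ===== LEMMAS AND PROOFS =====

-- the five (rank, label) pairs, in priority order
def rankPairs : List (Int × String) :=
  [(0, "Secret"), (1, "High Confidential"), (2, "Confidential"), (3, "Internal Usage"), (4, "Public")]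

-- A's dict is the second projection of B's dict, pointwise
lemma get?_cls_eq (c : String) :
    PySem.Dict.get? CLASSIFICATION_TO_SENSITIVITY c =
      (PySem.Dict.get? CLASSIFICATION_TO_RANKED c).map (fun x => x.2) := by
  have h1 : CLASSIFICATION_TO_SENSITIVITY = PySem.Dict.mk
    [("pii", "Confidential"), ("personal data", "Confidential"), ("financial", "Confidential"),
     ("secret", "Secret"), ("high confidential", "High Confidential"), ("confidential", "Confidential"),
     ("internal usage", "Internal Usage"), ("public", "Public"), ("sensitive", "Confidential"),
     ("restricted", "Secret"), ("regulated", "Confidential")] := by rfl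
  have h2 : CLASSIFICATION_TO_RANKED = PySem.Dict.mk
    [("pii", (2, "Confidential")), ("personal data", (2, "Confidential")), ("financial", (2, "Confidential")),
     ("secret", (0, "Secret")), ("high confidential", (1, "High Confidential")), ("confidential", (2, "Confidential")),
     ("internal usage", (3, "Internal Usage")), ("public", (4, "Public")), ("sensitive", (2, "Confidential")),
     ("restricted", (0, "Secret")), ("regulated", (2, "Confidential"))] := by rfl
  rw [h1, h2]
  simp only [PySem.Dict.get?_mk_cons, apply_ite (Option.map (fun x : Int × String => x.2)),
    Option.map_some]
  rfl

-- a value looked up in a literal dict is one of its listed values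
lemma get?_mk_mem {κ ν : Type} [BEq κ] (l : List (κ × ν)) (c : κ) (v : ν)
    (h : (PySem.Dict.mk l).get? c = some v) : v ∈ l.map Prod.snd := by
  induction l with
  | nil => simp [PySem.Dict.get?] at h
  | cons p rest ih =>
    obtain ⟨k, w⟩ := p
    rw [PySem.Dict.get?_mk_cons] at h
    by_cases hc : (k == c) = true
    · rw [if_pos hc] at h; injection h with h; simp [h]
    · rw [if_neg hc] at h; simp [ih h]

-- every value of B's dict is one of the five rank pairs, with a nonempty label
lemma get?_ranked_mem (c : String) (p : Int × String)
    (h : PySem.Dict.get? CLASSIFICATION_TO_RANKED c = some p) : p ∈ rankPairs ∧ p.2 ≠ "" := by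
  have h2 : CLASSIFICATION_TO_RANKED = PySem.Dict.mk
    [("pii", (2, "Confidential")), ("personal data", (2, "Confidential")), ("financial", (2, "Confidential")),
     ("secret", (0, "Secret")), ("high confidential", (1, "High Confidential")), ("confidential", (2, "Confidential")),
     ("internal usage", (3, "Internal Usage")), ("public", (4, "Public")), ("sensitive", (2, "Confidential")),
     ("restricted", (0, "Secret")), ("regulated", (2, "Confidential"))] := by rfl
  rw [h2] at h
  have hm := get?_mk_mem _ _ _ h
  simp only [List.map_cons, List.map_nil, List.mem_cons, List.not_mem_nil, or_false] at hm
  rcases hm with h'|h'|h'|h'|h'|h'|h'|h'|h'|h'|h' <;> subst h' <;> exact ⟨by decide, by decide⟩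

-- the loop steps of the two ports, both on an already-normalized string
-- (B's port normalizes inline; its fold is `List.foldl_map`-reshaped in the final proof)
def stepA (s : PySem.Set String) (c : String) : PySem.Set String :=
  match PySem.Dict.get? CLASSIFICATION_TO_SENSITIVITY c with
  | some label => if label ≠ "" then PySem.Set.add s label else s
  | none => s

-- the invariant tying A's set of matched labels to B's running minimum
def LoopInv (s : PySem.Set String) (best : Option (Int × String)) : Prop :=
  (best = none → s = []) ∧
  (∀ r l, best = some (r, l) →
    (r, l) ∈ rankPairs ∧ l ∈ s ∧ ∀ p ∈ rankPairs, p.1 < r → p.2 ∉ s)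

lemma rank_inj {p q : Int × String} (hp : p ∈ rankPairs) (hq : q ∈ rankPairs)
    (h : p.2 = q.2) : p = q := by
  simp only [rankPairs, List.mem_cons, List.not_mem_nil, or_false] at hp hq
  rcases hp with h1|h1|h1|h1|h1 <;> rcases hq with h2|h2|h2|h2|h2 <;> subst h1 <;> subst h2 <;> simp_all

lemma inv_step (s : PySem.Set String) (best : Option (Int × String)) (name : String)
    (h : LoopInv s best) :
    LoopInv (stepA s (normalize_classification_name name)) (pyStep best name) := by
  unfold stepA pyStep
  rw [get?_cls_eq]
  simp only [normalize_classification_name]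
  cases hg : PySem.Dict.get? CLASSIFICATION_TO_RANKED
      (let n := PySem.Str.strip (PySem.Str.lower name)
       if PySem.Str.isIn "[" n then PySem.Str.strip (((PySem.Str.split? n "[").getD []).headD "") else n) with
  | none => simpa using h
  | some entry =>
    obtain ⟨hmem, hne⟩ := get?_ranked_mem _ _ hg
    obtain ⟨r', l'⟩ := entry
    simp only [Option.map_some, ne_eq, hne, not_false_eq_true, if_pos]
    cases best with
    | none =>
      have hs : s = [] := h.1 rfl
      refine ⟨fun hco => by simp at hco, ?_⟩
      rintro r l hrl
      cases hrl
      refine ⟨hmem, ?_, ?_⟩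
      · rw [PySem.Set.mem_add]; right; rfl
      · intro p hp hlt hmem'
        rw [PySem.Set.mem_add] at hmem'
        rcases hmem' with hmem' | hmem'
        · rw [hs] at hmem'; exact absurd hmem' (List.not_mem_nil)
        · have := rank_inj hp hmem hmem'
          rw [this] at hlt; exact absurd hlt (lt_irrefl _)
    | some b =>
      obtain ⟨rb, lb⟩ := b
      obtain ⟨hbp, hbl, hbmin⟩ := h.2 rb lb rfl
      by_cases hlt : r' < rb
      · simp only [if_pos hlt]
        refine ⟨fun hco => by simp at hco, ?_⟩
        rintro r l hrl
        cases hrl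
        refine ⟨hmem, ?_, ?_⟩
        · rw [PySem.Set.mem_add]; right; rfl
        · intro p hp hplt hmem'
          rw [PySem.Set.mem_add] at hmem'
          rcases hmem' with hmem' | hmem'
          · exact hbmin p hp (hplt.trans hlt) hmem'
          · have := rank_inj hp hmem hmem'
            rw [this] at hplt; exact absurd hplt (lt_irrefl _)
      · simp only [if_neg hlt]
        refine ⟨fun hco => by simp at hco, ?_⟩
        rintro r l hrl
        cases hrl
        refine ⟨hbp, ?_, ?_⟩
        · rw [PySem.Set.mem_add]; left; exact hbl
        · intro p hp hplt hmem'
          rw [PySem.Set.mem_add] at hmem'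
          rcases hmem' with hmem' | hmem'
          · exact hbmin p hp hplt hmem'
          · have := rank_inj hp hmem hmem'
            rw [this] at hplt
            exact hlt hplt

lemma inv_fold (cs : List String) (s : PySem.Set String) (best : Option (Int × String))
    (h : LoopInv s best) :
    LoopInv ((cs.map normalize_classification_name).foldl stepA s) (cs.foldl pyStep best) := by
  induction cs generalizing s best with
  | nil => exact h
  | cons c rest ih =>
    simp only [List.map_cons, List.foldl_cons]
    exact ih _ _ (inv_step s best c h)

lemma final_none (s : PySem.Set String) (hs : s = []) :
    (if s.isEmpty then "Not Classified" else scanPriority SENSITIVITY_PRIORITY s) = "Not Classified" := by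
  subst hs; rfl

lemma final_some (s : PySem.Set String) (r : Int) (l : String)
    (hbp : (r, l) ∈ rankPairs) (hbl : l ∈ s)
    (hbmin : ∀ p ∈ rankPairs, p.1 < r → p.2 ∉ s) :
    (if s.isEmpty then "Not Classified" else scanPriority SENSITIVITY_PRIORITY s) = l := by
  have hne : s.isEmpty = false := by
    cases s with
    | nil => exact absurd hbl (List.not_mem_nil)
    | cons a t => rfl
  rw [hne]
  simp only [Bool.false_eq_true, if_false]
  simp only [rankPairs, List.mem_cons, List.not_mem_nil, or_false] at hbp
  rcases hbp with h1|h1|h1|h1|h1 <;> (injection h1 with hr hl; subst hr; subst hl)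
  · simp [SENSITIVITY_PRIORITY, scanPriority, hbl]
  · have n0 : "Secret" ∉ s := hbmin (0, "Secret") (by simp [rankPairs]) (by norm_num)
    simp [SENSITIVITY_PRIORITY, scanPriority, hbl, n0]
  · have n0 : "Secret" ∉ s := hbmin (0, "Secret") (by simp [rankPairs]) (by norm_num)
    have n1 : "High Confidential" ∉ s := hbmin (1, "High Confidential") (by simp [rankPairs]) (by norm_num)
    simp [SENSITIVITY_PRIORITY, scanPriority, hbl, n0, n1]
  · have n0 : "Secret" ∉ s := hbmin (0, "Secret") (by simp [rankPairs]) (by norm_num)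
    have n1 : "High Confidential" ∉ s := hbmin (1, "High Confidential") (by simp [rankPairs]) (by norm_num)
    have n2 : "Confidential" ∉ s := hbmin (2, "Confidential") (by simp [rankPairs]) (by norm_num)
    simp [SENSITIVITY_PRIORITY, scanPriority, hbl, n0, n1, n2]
  · have n0 : "Secret" ∉ s := hbmin (0, "Secret") (by simp [rankPairs]) (by norm_num)
    have n1 : "High Confidential" ∉ s := hbmin (1, "High Confidential") (by simp [rankPairs]) (by norm_num)
    have n2 : "Confidential" ∉ s := hbmin (2, "Confidential") (by simp [rankPairs]) (by norm_num)
    have n3 : "Internal Usage" ∉ s := hbmin (3, "Internal Usage") (by simp [rankPairs]) (by norm_num)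
    simp [SENSITIVITY_PRIORITY, scanPriority, hbl, n0, n1, n2, n3]

-- ===== VERDICT (by name: the statement is the Claim_ definition above) =====
theorem classify_to_sensitivity_spec : Claim_equal_classify_to_sensitivity := by
  intro cs _
  have hinv : LoopInv ((cs.map normalize_classification_name).foldl stepA PySem.Set.empty)
      (cs.foldl pyStep none) :=
    inv_fold cs PySem.Set.empty none ⟨fun _ => rfl, fun r l hh => by simp at hh⟩
  unfold Spec_classify_to_sensitivity classify_to_sensitivity classify_to_sensitivity_alt
  simp only []
  cases hb : List.foldl pyStep none cs with
  | none =>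
    rw [hb] at hinv
    exact final_none _ (hinv.1 rfl)
  | some b =>
    obtain ⟨r, l⟩ := b
    rw [hb] at hinv
    obtain ⟨hbp, hbl, hbmin⟩ := hinv.2 r l rfl
    exact final_some _ r l hbp hbl hbmin
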